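-- pv_equiv track=rewrite | github.com/Audrey-Wang/155-miniproj3 | rnn_helper.py | generate_onehot_dict
-- ===== SOURCE A (Python) =====
-- def generate_onehot_dict(let_list):
--     """
--     Takes a list of the words in a text file, returning a dictionary mapping
--     words to their index in a one-hot-encoded representation of the words.
--     """
--     let_to_index = {}
--     i = 0
--     for letter in let_list:
--         if letter not in let_to_index:
--             let_to_index[letter] = i
--             i += 1
--         if len(let_to_index) == 26:
--             break
--     return let_to_index
-- ===== SOURCE B (Python) =====
-- def generate_onehot_dict(let_list):
--     """Sort-based: a reversed sweep records each letter's first-occurrence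
--     position (earlier writes overwrite later ones), then the letters are
--     ordered by that position, capped at 26, and numbered."""
--     first_pos = {}
--     for pos, letter in reversed(list(enumerate(let_list))):
--         first_pos[letter] = pos
--     order = sorted(first_pos, key=first_pos.get)[:26]
--     return {letter: i for i, letter in enumerate(order)}
-- ===== Notes on version B (the rewrite author's own statement) =====
-- stated objective: alternative
-- what changed: Replaces A's forward scan with a membership test, manual counter and break-at-26 by a sort-based algorithm: a reversed sweep records each letter's first-occurrence position, then the letters are sorted by that position, capped at 26, and numbered.
import Mathlib
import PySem

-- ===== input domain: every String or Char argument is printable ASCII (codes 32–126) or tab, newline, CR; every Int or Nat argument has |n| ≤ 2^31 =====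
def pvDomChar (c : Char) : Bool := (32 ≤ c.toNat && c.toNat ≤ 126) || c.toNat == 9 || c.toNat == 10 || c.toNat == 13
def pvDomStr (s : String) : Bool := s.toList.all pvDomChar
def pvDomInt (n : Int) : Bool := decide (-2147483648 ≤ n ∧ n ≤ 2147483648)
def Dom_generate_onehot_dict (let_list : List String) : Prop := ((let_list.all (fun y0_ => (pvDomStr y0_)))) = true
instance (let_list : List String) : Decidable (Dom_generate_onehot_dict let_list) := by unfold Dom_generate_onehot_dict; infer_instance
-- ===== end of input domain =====

-- B replaces A's forward scan (membership test, manual counter, break at 26) with a different algorithm: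
-- a reversed sweep records each letter's first-occurrence position, the letters are then SORTED by that
-- position, capped at 26, and numbered (objective: alternative).

-- ===== PORT A =====
-- loop 'for letter in let_list' with early break, state (let_to_index, i)
def pvGoA (d : PySem.Dict String Int) (i : Int) : List String → PySem.Dict String Int
  | [] => d
  | letter :: rest =>
    let st := if d.contains letter then (d, i) else (d.insert letter i, i + 1)
    if st.1.size == 26 then st.1 else pvGoA st.1 st.2 rest

def generate_onehot_dict (let_list : List String) : List (String × Int) :=
  (pvGoA PySem.Dict.empty 0 let_list).items

-- ===== PORT B =====
-- 'for pos, letter in reversed(list(enumerate(let_list))): first_pos[letter] = pos'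
def pvFp (let_list : List String) : PySem.Dict String Int :=
  ((PySem.List.enumerate let_list 0).reverse).foldl (fun d p => d.insert p.2 p.1) PySem.Dict.empty

def generate_onehot_dict_alt (let_list : List String) : List (String × Int) :=
  let fp := pvFp let_list
  -- sorted(first_pos, key=first_pos.get)[:26]: the key lookup is exact as getD 0 since every
  -- element iterated is a key of fp; slice [:26] with nonnegative stop = take 26 (exact)
  let order := (PySem.List.sorted fp.keys (fun k => fp.getD k 0)).take 26
  -- {letter: i for i, letter in enumerate(order)} — keys distinct, insertion order
  (PySem.List.enumerate order 0).map (fun p => (p.2, p.1))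

-- ===== PRECONDITION & SPEC =====
def Spec_generate_onehot_dict (let_list : List String) (out : List (String × Int)) : Prop := out = generate_onehot_dict_alt let_list
instance (let_list : List String) (out : List (String × Int)) : Decidable (Spec_generate_onehot_dict let_list out) := by unfold Spec_generate_onehot_dict; infer_instance

-- ===== CLAIM (what is proved, stated in full; the proofs are below) =====
def Claim_equal_generate_onehot_dict : Prop := ∀ (let_list : List String), Dom_generate_onehot_dict let_list → Spec_generate_onehot_dict let_list (generate_onehot_dict let_list)

-- ===== LEMMAS AND PROOFS =====

-- ---- A side: A's loop builds the dict of the first ≤ 26 distinct letters in order ----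

-- the dict mapping the letters u, in order, to 0,1,2,…
def pvD (u : List String) : PySem.Dict String Int :=
  PySem.Dict.mk ((PySem.List.enumerate u 0).map (fun p => (p.2, p.1)))

theorem pvD_keys (u : List String) : (pvD u).keys = u := by
  simp [pvD, PySem.Dict.keys, List.map_map]
  exact PySem.List.map_snd_enumerate u 0

theorem pvD_contains (u : List String) (x : String) :
    (pvD u).contains x = decide (x ∈ u) := by
  rw [PySem.Dict.contains_eq_decide_mem_keys, pvD_keys]

theorem pvD_size (u : List String) : (pvD u).size = u.length := by
  simp [pvD, PySem.Dict.size, PySem.List.length_enumerate]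

theorem pvD_insert (u : List String) (x : String) (hx : x ∉ u) :
    (pvD u).insert x (u.length : Int) = pvD (u ++ [x]) := by
  apply PySem.Dict.ext
  rw [PySem.Dict.items_insert_of_not_contains]
  · simp [pvD, PySem.List.enumerate_append, PySem.List.enumerate_cons, PySem.List.enumerate_nil]
  · rw [pvD_contains]; simpa using hx

theorem pvSet_add_eq (u : List String) (x : String) :
    PySem.Set.add u x = if x ∈ u then u else u ++ [x] := by
  simp [PySem.Set.add, PySem.Set.contains]

theorem pvUpdate_exists (ls : List String) : ∀ u : List String, ∃ t, PySem.Set.update u ls = u ++ t := by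
  induction ls with
  | nil => exact fun u => ⟨[], by simp [PySem.Set.update]⟩
  | cons x ls ih =>
    intro u
    have hstep : PySem.Set.update u (x :: ls) = PySem.Set.update (PySem.Set.add u x) ls := by
      simp [PySem.Set.update, List.foldl_cons]
    obtain ⟨t, ht⟩ := ih (PySem.Set.add u x)
    rw [hstep, ht, pvSet_add_eq]
    by_cases hx : x ∈ u
    · exact ⟨t, by simp [hx]⟩
    · exact ⟨x :: t, by simp [hx]⟩

theorem pvGoA_eq (ls : List String) : ∀ u : List String, u.Nodup → u.length < 26 →
    pvGoA (pvD u) (u.length : Int) ls = pvD ((PySem.Set.update u ls).take 26) := by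
  induction ls with
  | nil =>
    intro u _ hlen
    simp [pvGoA, PySem.Set.update, List.take_of_length_le (Nat.le_of_lt hlen)]
  | cons letter rest ih =>
    intro u hnd hlen
    have hstep : PySem.Set.update u (letter :: rest) = PySem.Set.update (PySem.Set.add u letter) rest := by
      simp [PySem.Set.update, List.foldl_cons]
    by_cases hmem : letter ∈ u
    · have hc : (pvD u).contains letter = true := by rw [pvD_contains]; simpa using hmem
      have hsz : ((pvD u).size == 26) = false := by
        rw [pvD_size]; simp; omega
      have hadd : PySem.Set.add u letter = u := by rw [pvSet_add_eq]; simp [hmem]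
      rw [hstep, hadd]
      simpa [pvGoA, hc, hsz] using ih u hnd hlen
    · have hc : (pvD u).contains letter = false := by rw [pvD_contains]; simpa using hmem
      have hins : (pvD u).insert letter (u.length : Int) = pvD (u ++ [letter]) := pvD_insert u letter hmem
      have hadd : PySem.Set.add u letter = u ++ [letter] := by rw [pvSet_add_eq]; simp [hmem]
      have hnd' : (u ++ [letter]).Nodup := by
        simp [List.nodup_append, hnd]
        exact fun a ha e => hmem (e ▸ ha)
      rw [hstep, hadd]
      by_cases h26 : u.length + 1 = 26
      · have hsz : ((pvD (u ++ [letter])).size == 26) = true := by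
          rw [pvD_size]; simp [h26]
        obtain ⟨t, ht⟩ := pvUpdate_exists rest (u ++ [letter])
        have htake : (PySem.Set.update (u ++ [letter]) rest).take 26 = u ++ [letter] := by
          rw [ht]
          have : (u ++ [letter]).length = 26 := by simp [h26]
          rw [← this, List.take_left]
        rw [htake]
        simp [pvGoA, hc, hins, hsz]
      · have hsz : ((pvD (u ++ [letter])).size == 26) = false := by
          rw [pvD_size]; simp; omega
        have hlen' : (u ++ [letter]).length < 26 := by simp; omega
        have := ih (u ++ [letter]) hnd' hlen'
        have hcast : ((u.length : Int) + 1) = ((u ++ [letter]).length : Int) := by simp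
        simp only [pvGoA, hc, if_false, hins, hsz, Bool.false_eq_true, hcast]
        exact this

theorem pvA_eq (l : List String) :
    generate_onehot_dict l =
      (PySem.List.enumerate ((PySem.List.dedup l).take 26) 0).map (fun p => (p.2, p.1)) := by
  have h0 : PySem.Dict.empty = pvD ([] : List String) := by
    simp [pvD, PySem.List.enumerate_nil, PySem.Dict.empty]
  have h := pvGoA_eq l [] (by simp) (by norm_num)
  have hupd : PySem.Set.update ([] : List String) l = PySem.List.dedup l := by
    simp [PySem.Set.update_nil_left]
  unfold generate_onehot_dict
  rw [h0]
  simpa [pvD, hupd] using congrArg PySem.Dict.items h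

-- ---- B side: the reversed sweep records first-occurrence positions; sorting recovers the dedup order ----

-- idxOf? on a member is idxOf
theorem pvIdxOf?_of_mem {l : List String} {x : String} (h : x ∈ l) :
    List.idxOf? x l = some (l.idxOf x) := by
  induction l with
  | nil => cases h
  | cons y l ih =>
    rw [List.idxOf?_cons]
    by_cases hyx : y = x
    · subst hyx; simp
    · have hx : x ∈ l := by
        rcases List.mem_cons.mp h with h' | h'
        · exact absurd h'.symm hyx
        · exact h'
      simp [hyx, ih hx, List.idxOf_cons_ne _ hyx]

-- value of the reversed-sweep fold: the FIRST pair (reading ps.reverse forward) with that key wins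
theorem pvFold_getD (ps : List (Int × String)) (d : PySem.Dict String Int) (x : String) :
    (ps.foldl (fun d p => d.insert p.2 p.1) d).getD x 0 =
      match ps.reverse.find? (fun p => p.2 == x) with
      | some p => p.1
      | none => d.getD x 0 := by
  induction ps generalizing d with
  | nil => simp
  | cons p ps ih =>
    rw [List.foldl_cons, ih, List.reverse_cons, List.find?_append]
    cases h : ps.reverse.find? (fun q => q.2 == x) with
    | some q => simp
    | none =>
      by_cases hx : x = p.2
      · subst hx; simp [PySem.Dict.getD_insert_self]
      · have : (p.2 == x) = false := by simp [Ne.symm hx]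
        simp [this, PySem.Dict.getD_insert_of_ne _ _ _ hx]

-- find? over enumerate finds the first occurrence with its position
theorem pvFind_enum (l : List String) (x : String) : ∀ s : Int,
    (PySem.List.enumerate l s).find? (fun p => p.2 == x) =
      (List.idxOf? x l).map (fun k => (s + (k : Int), x)) := by
  induction l with
  | nil => intro s; simp [PySem.List.enumerate_nil]
  | cons y l ih =>
    intro s
    rw [PySem.List.enumerate_cons, List.find?_cons, List.idxOf?_cons]
    by_cases hyx : y = x
    · subst hyx; simp
    · have hb : (y == x) = false := by simp [hyx]
      simp only [hb, ih (s + 1)]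
      cases List.idxOf? x l with
      | none => simp
      | some k => simp; ring

-- getD on pvFp of a member is the first-occurrence index
theorem pvFp_getD {l : List String} {x : String} (h : x ∈ l) :
    (pvFp l).getD x 0 = (l.idxOf x : Int) := by
  unfold pvFp
  rw [pvFold_getD, List.reverse_reverse, pvFind_enum l x 0, pvIdxOf?_of_mem h]
  simp

theorem pvFp_keys (l : List String) :
    (pvFp l).keys = PySem.Set.ofList l.reverse := by
  unfold pvFp
  have := PySem.Dict.keys_foldl_insert_key ((PySem.List.enumerate l 0).reverse)
    (fun p : Int × String => p.2) (fun _ p => p.1) (PySem.Dict.empty (ν := Int))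
  simp only [PySem.Dict.keys_empty, PySem.Set.update_nil_left] at this
  rw [this, List.map_reverse, PySem.List.map_snd_enumerate]

-- the dedup list is strictly increasing in first-occurrence index
theorem pvOfList_pairwise (l : List String) :
    (PySem.Set.ofList l).Pairwise (fun a b => l.idxOf a < l.idxOf b) := by
  induction l with
  | nil => simp [PySem.Set.ofList_nil]
  | cons x l ih =>
    rw [PySem.Set.ofList_cons]
    refine List.Pairwise.cons ?_ ?_
    · intro b hb
      obtain ⟨_, hbne⟩ := (PySem.Set.mem_discard _ _ _).mp hb
      rw [List.idxOf_cons_self, List.idxOf_cons_ne _ (Ne.symm hbne)]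
      exact Nat.succ_pos _
    · have hsub : ((PySem.Set.ofList l).discard x).Sublist (PySem.Set.ofList l) := by
        simp [PySem.Set.discard]
      refine (ih.sublist hsub).imp_of_mem ?_
      intro a b ha hb hab
      obtain ⟨_, hane⟩ := (PySem.Set.mem_discard _ _ _).mp ha
      obtain ⟨_, hbne⟩ := (PySem.Set.mem_discard _ _ _).mp hb
      rw [List.idxOf_cons_ne _ (Ne.symm hane), List.idxOf_cons_ne _ (Ne.symm hbne)]
      exact Nat.succ_lt_succ hab

theorem pvSorted_eq_dedup (l : List String) :
    PySem.List.sorted (pvFp l).keys (fun k => (pvFp l).getD k 0) = PySem.List.dedup l := by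
  apply PySem.List.sorted_eq_of_perm_of_pairwise_lt
  · -- dedup l ~ keys of the first-position dict
    rw [pvFp_keys, PySem.List.dedup_eq_ofList]
    refine (List.perm_ext_iff_of_nodup (PySem.Set.nodup_ofList l)
      (PySem.Set.nodup_ofList l.reverse)).mpr ?_
    intro a
    rw [PySem.Set.mem_ofList, PySem.Set.mem_ofList, List.mem_reverse]
  · -- dedup l is strictly increasing in the key
    rw [PySem.List.dedup_eq_ofList]
    refine (pvOfList_pairwise l).imp_of_mem ?_
    intro a b ha hb hab
    rw [pvFp_getD ((PySem.Set.mem_ofList l a).mp ha),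
        pvFp_getD ((PySem.Set.mem_ofList l b).mp hb)]
    exact_mod_cast hab

theorem pvB_eq (l : List String) :
    generate_onehot_dict_alt l =
      (PySem.List.enumerate ((PySem.List.dedup l).take 26) 0).map (fun p => (p.2, p.1)) := by
  simp only [generate_onehot_dict_alt, pvSorted_eq_dedup]

-- ===== VERDICT (by name: the statement is the Claim_ definition above) =====
theorem generate_onehot_dict_spec : Claim_equal_generate_onehot_dict := by
  intro l _
  show generate_onehot_dict l = generate_onehot_dict_alt l
  rw [pvA_eq, pvB_eq]
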